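-- pv_equiv track=rewrite | github.com/daniel-reich/ubiquitous-fiesta | JmyD5D4KnhzmMPEKz_20.py | constraint
-- ===== SOURCE A (Python) =====
-- def constraint(txt):
--   txt = txt.casefold()
--   lst_ch = [ch for ch in txt
--                 if ch.isalpha()]
--   set_ch = set(lst_ch)
--
--   if len(set_ch) == 26:
--     return 'Pangram'
--   if len(lst_ch) == len(set_ch):
--     return 'Heterogram'
--
--   words = txt.split(' ')
--   first_ch = set(word[0]
--                 for word in words)
--   if len(first_ch) == 1:
--     return 'Tautogram'
--
--   alphabet = 'abcdefghijklmnopqrstuvwxyz'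
--   share_ch = [ch for ch in alphabet
--              if all(ch in word
--                  for word in words)]
--   if len(share_ch) != 0:
--     return 'Transgram'
--
--   return 'Sentence'
-- ===== SOURCE B (Python) =====
-- def constraint(txt):
--   t = txt.casefold()
--   counts = {}
--   firsts = set()
--   common = None
--   for w in t.split(' '):
--     chars = set(w)
--     firsts.add(w[:1])
--     common = chars if common is None else common & chars
--     for ch in w:
--       if ch.isalpha():
--         counts[ch] = counts.get(ch, 0) + 1
--   if len(counts) == 26:
--     return 'Pangram'
--   if all(v == 1 for v in counts.values()):
--     return 'Heterogram'
--   if len(firsts) == 1: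
--     return 'Tautogram'
--   if any(ch.isalpha() for ch in common):
--     return 'Transgram'
--   return 'Sentence'
-- ===== Notes on version B (the rewrite author's own statement) =====
-- stated objective: alternative
-- what changed: B replaces A's staged passes (build the alpha-letter list and set, compare sizes, then split and build a first-letter set, then scan 26 alphabet letters against every word) by a single pass over the split words that simultaneously accumulates a letter-frequency dict, the set of first characters w[:1], and the running intersection of word character sets, and classifies from those three accumulators afterwards.
import Mathlib
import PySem

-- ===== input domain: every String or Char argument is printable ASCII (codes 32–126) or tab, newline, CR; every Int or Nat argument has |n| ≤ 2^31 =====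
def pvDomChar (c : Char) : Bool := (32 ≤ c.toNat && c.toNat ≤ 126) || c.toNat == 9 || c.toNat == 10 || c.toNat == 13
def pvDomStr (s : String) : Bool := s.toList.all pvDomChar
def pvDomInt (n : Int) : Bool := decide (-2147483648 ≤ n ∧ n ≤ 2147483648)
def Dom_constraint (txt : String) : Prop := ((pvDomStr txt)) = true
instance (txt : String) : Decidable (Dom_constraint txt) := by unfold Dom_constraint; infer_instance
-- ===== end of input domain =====

-- B makes ONE pass over the words, accumulating a letter-frequency dict, the set of
-- first characters (w[:1]) and the running intersection of the word character sets,
-- and classifies from those three accumulators afterwards, instead of A's staged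
-- passes (letter list + set, then a split, then a 26-letters-by-words membership scan).
-- casefold is ported as lower (identical on the ASCII domain); Python's 1-character
-- 'ch in word' is ported as list membership (exact for 1-character needles).

def pvAlphabet : List Char := "abcdefghijklmnopqrstuvwxyz".toList

-- ===== PORT A =====
def constraint (txt : String) : String :=
  let t := PySem.Chars.lower txt.toList
  let lst_ch := t.filter PySem.Chars.isalpha
  let set_ch := PySem.Set.ofList lst_ch
  if set_ch.length = 26 then "Pangram"
  else if lst_ch.length = set_ch.length then "Heterogram"
  else
    let words := PySem.Chars.splitOn t [' ']
    -- word[0] raises IndexError on an empty word: total form pyGetD, those inputs are outside Pre_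
    let first_ch := PySem.Set.ofList (words.map (fun w => PySem.List.pyGetD w 0 ' '))
    if first_ch.length = 1 then "Tautogram"
    else
      let share_ch := pvAlphabet.filter (fun ch => words.all (fun w => w.contains ch))
      if share_ch.length ≠ 0 then "Transgram"
      else "Sentence"

-- ===== PORT B =====
-- the body of B's single 'for w in t.split(' ')' loop, on the state (counts, firsts, common)
def pvStep (acc : PySem.Dict Char Int × PySem.Set (List Char) × Option (PySem.Set Char))
    (w : List Char) : PySem.Dict Char Int × PySem.Set (List Char) × Option (PySem.Set Char) :=
  let chars := PySem.Set.ofList w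
  let firsts := PySem.Set.add acc.2.1 (PySem.List.slice w none (some 1))
  let common := match acc.2.2 with
    | none => some chars
    | some s => some (PySem.Set.inter s chars)
  let counts := w.foldl (fun d ch =>
    if PySem.Chars.isalpha ch then d.insert ch (d.getD ch 0 + 1) else d) acc.1
  (counts, firsts, common)

def constraint_alt (txt : String) : String :=
  let t := PySem.Chars.lower txt.toList
  let st := (PySem.Chars.splitOn t [' ']).foldl pvStep (PySem.Dict.empty, PySem.Set.empty, none)
  if st.1.size = 26 then "Pangram"
  else if st.1.values.all (fun v => v == 1) then "Heterogram"
  else if PySem.Set.len st.2.1 = 1 then "Tautogram"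
  -- 'any(ch.isalpha() for ch in common)': an order-independent consumption of the set;
  -- common is never None since split(' ') returns at least one word (getD [] is unreachable)
  else if (st.2.2.getD []).any PySem.Chars.isalpha then "Transgram"
  else "Sentence"

-- ===== PRECONDITION & SPEC =====
-- Pre_ excludes exactly the inputs on which A raises IndexError at word[0]: texts that are
-- neither pangrams nor repeat-free and whose space-separated word list contains an empty word
-- (B, which takes w[:1] instead, returns a normal classification there).
def Pre_constraint (txt : String) : Prop :=
  (PySem.Set.ofList ((PySem.Chars.lower txt.toList).filter PySem.Chars.isalpha)).length = 26 ∨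
  ((PySem.Chars.lower txt.toList).filter PySem.Chars.isalpha).Nodup ∨
  ∀ w ∈ PySem.Chars.splitOn (PySem.Chars.lower txt.toList) [' '], w ≠ []
instance (txt : String) : Decidable (Pre_constraint txt) := by unfold Pre_constraint; infer_instance

def pvWitness_constraint : String := "big bold bear"

def Spec_constraint (txt : String) (out : String) : Prop := out = constraint_alt txt
instance (txt : String) (out : String) : Decidable (Spec_constraint txt out) := by unfold Spec_constraint; infer_instance

-- ===== CLAIM (what is proved, stated in full; the proofs are below) =====
def Claim_equal_constraint : Prop := ∀ (txt : String), Dom_constraint txt → Pre_constraint txt → Spec_constraint txt (constraint txt)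

-- ===== LEMMAS AND PROOFS =====

-- splitOn never returns the empty list
lemma pv_go_ne_nil (sep : List Char) (fuel : Nat) (l cur : List Char) (acc : List (List Char)) :
    PySem.Chars.splitOn.go sep fuel l cur acc ≠ [] := by
  induction fuel generalizing l cur acc with
  | zero => simp [PySem.Chars.splitOn.go]
  | succ n ih =>
    cases l with
    | nil => simp [PySem.Chars.splitOn.go]
    | cons c rest =>
      rw [PySem.Chars.splitOn.go]
      split
      · exact ih _ _ _
      · exact ih _ _ _

lemma pv_splitOn_ne_nil (s sep : List Char) : PySem.Chars.splitOn s sep ≠ [] :=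
  pv_go_ne_nil sep (s.length + 1) s [] []

-- the concatenation of the pieces of split(' ') is the text without its spaces
lemma pv_go_flatten (fuel : Nat) (l cur : List Char) (acc : List (List Char))
    (h : l.length ≤ fuel) :
    (PySem.Chars.splitOn.go [' '] fuel l cur acc).flatten =
      acc.reverse.flatten ++ cur.reverse ++ l.filter (fun c => !(c == ' ')) := by
  induction fuel generalizing l cur acc with
  | zero =>
    have : l = [] := List.length_eq_zero_iff.mp (Nat.le_zero.mp h)
    subst this
    simp [PySem.Chars.splitOn.go]
  | succ n ih =>
    cases l with
    | nil => simp [PySem.Chars.splitOn.go]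
    | cons c rest =>
      have hlen : rest.length ≤ n := by simpa using h
      rw [PySem.Chars.splitOn.go]
      by_cases hc : c = ' '
      · subst hc
        rw [if_pos (by simp [List.isPrefixOf])]
        simp only [List.length_cons, List.drop_succ_cons, List.length_nil, List.drop_zero]
        rw [ih _ _ _ hlen]
        simp
      · rw [if_neg (by simp [List.isPrefixOf]; exact fun hh => hc hh.symm)]
        rw [ih _ _ _ hlen]
        have : (!(c == ' ')) = true := by simp [hc]
        simp [this]

lemma pv_splitOn_flatten (s : List Char) :
    (PySem.Chars.splitOn s [' ']).flatten = s.filter (fun c => !(c == ' ')) := by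
  rw [PySem.Chars.splitOn]
  rw [pv_go_flatten (s.length + 1) s [] [] (by omega)]
  simp

-- lowering never produces an uppercase letter
lemma pv_isupper_lowerChar (c : Char) : PySem.Chars.isupper (PySem.Chars.lowerChar c) = false := by
  rw [PySem.Chars.lowerChar]
  by_cases h : PySem.Chars.isupper c = true
  · rw [if_pos h]
    rw [PySem.Chars.isupper] at h ⊢
    have h1 : 65 ≤ c.toNat := (Bool.and_eq_true _ _ ▸ h).1 |> of_decide_eq_true
    have h2 : c.toNat ≤ 90 := (Bool.and_eq_true _ _ ▸ h).2 |> of_decide_eq_true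
    have hv : (Char.ofNat (c.toNat + 32)).toNat = c.toNat + 32 := by
      rw [Char.toNat_ofNat, if_pos]
      rw [Nat.isValidChar]
      left; omega
    apply Bool.and_eq_false_iff.mpr
    right
    apply decide_eq_false
    show ¬ ((Char.ofNat (c.toNat + 32)) ≤ 'Z')
    intro hle
    have : (Char.ofNat (c.toNat + 32)).toNat ≤ 90 := hle
    omega
  · rw [if_neg h]
    exact Bool.not_eq_true _ ▸ h

-- a lowercase letter is one of the 26 alphabet letters
lemma pv_islower_mem (c : Char) (h : PySem.Chars.islower c = true) : c ∈ pvAlphabet := by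
  rw [PySem.Chars.islower] at h
  have h1 : 97 ≤ c.toNat := (Bool.and_eq_true _ _ ▸ h).1 |> of_decide_eq_true
  have h2 : c.toNat ≤ 122 := (Bool.and_eq_true _ _ ▸ h).2 |> of_decide_eq_true
  have hc : c = Char.ofNat c.toNat := (Char.ofNat_toNat c).symm
  have halpha : pvAlphabet = (List.range' 97 26).map Char.ofNat := by decide
  rw [halpha, hc, List.mem_map]
  exact ⟨c.toNat, by rw [List.mem_range'_1]; omega, rfl⟩

-- an alphabetic character of a lowered text is one of the 26 letters
lemma pv_mem_lower_alpha {c : Char} {xs : List Char}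
    (hm : c ∈ PySem.Chars.lower xs) (ha : PySem.Chars.isalpha c = true) : c ∈ pvAlphabet := by
  rw [PySem.Chars.lower, List.mem_map] at hm
  obtain ⟨x, -, rfl⟩ := hm
  rw [PySem.Chars.isalpha, Bool.or_eq_true, pv_isupper_lowerChar] at ha
  exact pv_islower_mem _ (by simpa using ha)

lemma pv_alphabet_isalpha : ∀ a ∈ pvAlphabet, PySem.Chars.isalpha a = true := by
  intro a ha
  have halpha : pvAlphabet = (List.range' 97 26).map Char.ofNat := by decide
  rw [halpha, List.mem_map] at ha
  obtain ⟨n, hn, rfl⟩ := ha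
  rw [List.mem_range'_1] at hn
  have hv : (Char.ofNat n).toNat = n := by
    rw [Char.toNat_ofNat, if_pos]
    rw [Nat.isValidChar]; left; omega
  rw [PySem.Chars.isalpha, PySem.Chars.islower, Bool.or_eq_true]
  right
  rw [Bool.and_eq_true]
  refine ⟨decide_eq_true ?_, decide_eq_true ?_⟩
  · show 97 ≤ (Char.ofNat n).toNat
    omega
  · show (Char.ofNat n).toNat ≤ 122
    omega

-- |set(xs)| is the Finset cardinality
lemma pv_len_ofList (xs : List Char) : (PySem.Set.ofList xs).length = xs.toFinset.card := by
  have hf : (PySem.Set.ofList xs).toFinset = xs.toFinset := by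
    ext a; simp [List.mem_toFinset, PySem.Set.mem_ofList]
  rw [← hf, List.toFinset_card_of_nodup (PySem.Set.nodup_ofList xs)]

-- the one fold of B projects to three independent folds
lemma pv_fold_proj (ws : List (List Char)) (d : PySem.Dict Char Int)
    (f : PySem.Set (List Char)) (c : Option (PySem.Set Char)) :
    ws.foldl pvStep (d, f, c) =
      (ws.foldl (fun d w => w.foldl (fun d ch =>
          if PySem.Chars.isalpha ch then d.insert ch (d.getD ch 0 + 1) else d) d) d,
       ws.foldl (fun s w => s.add (PySem.List.slice w none (some 1))) f,
       ws.foldl (fun c w => match c with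
          | none => some (PySem.Set.ofList w)
          | some s => some (PySem.Set.inter s (PySem.Set.ofList w))) c) := by
  induction ws generalizing d f c with
  | nil => rfl
  | cons w ws ih => simp only [List.foldl_cons, pvStep, ih]

-- B's counts accumulator is Counter of the text's alphabetic characters
lemma pv_counts_eq (t : List Char) :
    (PySem.Chars.splitOn t [' ']).foldl (fun d w => w.foldl (fun d ch =>
        if PySem.Chars.isalpha ch then d.insert ch (d.getD ch 0 + 1) else d) d) PySem.Dict.empty =
      PySem.Dict.counter (t.filter PySem.Chars.isalpha) := by
  rw [← List.foldl_flatten, ← List.foldl_filter, pv_splitOn_flatten, List.filter_filter]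
  rw [← PySem.Dict.foldl_insert_getD_add_one_eq_counter]
  congr 1
  apply List.filter_congr
  intro c _
  by_cases hc : c = ' '
  · subst hc; decide
  · simp [hc]

-- B's firsts accumulator is set(w[:1] for w in words)
lemma pv_firsts_eq (ws : List (List Char)) :
    ws.foldl (fun s w => s.add (PySem.List.slice w none (some 1))) PySem.Set.empty =
      PySem.Set.ofList (ws.map (fun w => PySem.List.slice w none (some 1))) := by
  rw [← PySem.Set.update_map_eq_foldl_add]
  exact PySem.Set.update_nil_left _

-- B's common accumulator, once seeded, is the fold of intersections
lemma pv_common_some (ws : List (List Char)) (s : PySem.Set Char) :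
    ws.foldl (fun c w => match c with
        | none => some (PySem.Set.ofList w)
        | some s => some (PySem.Set.inter s (PySem.Set.ofList w))) (some s) =
      some (ws.foldl (fun s w => PySem.Set.inter s (PySem.Set.ofList w)) s) := by
  induction ws generalizing s with
  | nil => rfl
  | cons w ws ih => simp only [List.foldl_cons, ih]

-- heterogram: counting each distinct element once iff no duplicates
lemma pv_nodup_iff_len (ls : List Char) :
    ls.length = (PySem.Set.ofList ls).length ↔ ls.Nodup := by
  rw [pv_len_ofList, List.card_toFinset]
  constructor
  · intro h
    exact List.dedup_eq_self.mp ((List.dedup_sublist ls).eq_of_length h.symm)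
  · intro h
    rw [List.dedup_eq_self.mpr h]

-- E2: heterogram guards agree
lemma pv_heterogram_iff (ls : List Char) :
    ls.length = (PySem.Set.ofList ls).length ↔
    ((PySem.Dict.counter ls).values.all (fun v => v == 1)) = true := by
  rw [pv_nodup_iff_len]
  have hv : (PySem.Dict.counter ls).values =
      (PySem.Set.ofList ls).map (fun k => (ls.count k : Int)) := by
    rw [PySem.Dict.values, PySem.Dict.items_counter, List.map_map]
    simp [Function.comp]
  rw [hv, List.nodup_iff_count_eq_one]
  simp only [List.all_eq_true, List.mem_map, beq_iff_eq]
  constructor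
  · rintro h v ⟨k, hk, rfl⟩
    rw [PySem.Set.mem_ofList] at hk
    exact_mod_cast h k hk
  · intro h a ha
    have := h (ls.count a : Int) ⟨a, (PySem.Set.mem_ofList _ _).mpr ha, rfl⟩
    exact_mod_cast this

-- E3: tautogram guards agree when every word is nonempty
lemma pv_taut_iff (ws : List (List Char)) (hne : ∀ w ∈ ws, w ≠ []) :
    (PySem.Set.ofList (ws.map (fun w => PySem.List.pyGetD w 0 ' '))).length = 1 ↔
    PySem.Set.len (PySem.Set.ofList (ws.map (fun w => PySem.List.slice w none (some 1)))) = 1 := by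
  have hmap : ws.map (fun w => PySem.List.slice w none (some 1)) =
      (ws.map (fun w => PySem.List.pyGetD w 0 ' ')).map (fun c => [c]) := by
    rw [List.map_map]
    apply List.map_congr_left
    intro w hw
    obtain ⟨a, rest, rfl⟩ := List.ne_nil_iff_exists_cons.mp (hne w hw)
    rw [PySem.List.slice_to _ (by omega)]
    simp [PySem.List.pyGetD_zero_cons]
  have hinj : Function.Injective (fun c : Char => [c]) := by
    intro a b h; simpa using h
  have hlen : (PySem.Set.ofList ((ws.map (fun w => PySem.List.pyGetD w 0 ' ')).map (fun c => [c]))).length =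
      (PySem.Set.ofList (ws.map (fun w => PySem.List.pyGetD w 0 ' '))).length := by
    have h1 : ∀ (l : List Char), (PySem.Set.ofList (l.map (fun c => [c]))).length = l.toFinset.card := by
      intro l
      have hf : (PySem.Set.ofList (l.map (fun c => [c]))).toFinset = (l.map (fun c => [c])).toFinset := by
        ext a; simp [List.mem_toFinset, PySem.Set.mem_ofList]
      have hft : (l.map (fun c => [c])).toFinset = l.toFinset.image (fun c => [c]) := by
        ext a; simp [List.mem_map, Finset.mem_image]
      rw [← List.toFinset_card_of_nodup (PySem.Set.nodup_ofList _), hf, hft,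
        Finset.card_image_of_injective _ hinj]
    rw [h1, pv_len_ofList]
  rw [hmap, PySem.Set.len]
  constructor
  · intro h; rw [hlen, h]; rfl
  · intro h
    rw [← hlen]
    exact_mod_cast h

-- membership in a fold of set intersections
lemma pv_mem_foldl_inter (ws : List (List Char)) (s : PySem.Set Char) (c : Char) :
    c ∈ ws.foldl (fun s w => PySem.Set.inter s (PySem.Set.ofList w)) s ↔
      c ∈ s ∧ ∀ w ∈ ws, c ∈ w := by
  induction ws generalizing s with
  | nil => simp
  | cons w ws ih =>
    simp only [List.foldl_cons, ih, PySem.Set.mem_inter, PySem.Set.mem_ofList, List.mem_cons]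
    constructor
    · rintro ⟨⟨h1, h2⟩, h3⟩
      exact ⟨h1, fun v hv => hv.elim (fun he => he ▸ h2) (h3 v)⟩
    · rintro ⟨h1, h2⟩
      exact ⟨⟨h1, h2 w (Or.inl rfl)⟩, fun v hv => h2 v (Or.inr hv)⟩

-- E4: transgram guards agree (halpha: alphabetic characters of the words are alphabet letters)
lemma pv_trans_iff (w0 : List Char) (ws : List (List Char))
    (halpha : ∀ c ∈ w0, PySem.Chars.isalpha c = true → c ∈ pvAlphabet) :
    (pvAlphabet.filter (fun ch => ((w0 :: ws).all (fun v => v.contains ch)))).length ≠ 0 ↔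
    ((ws.foldl (fun s w => PySem.Set.inter s (PySem.Set.ofList w)) (PySem.Set.ofList w0)).any
      PySem.Chars.isalpha) = true := by
  constructor
  · intro h
    rw [Ne, List.length_eq_zero_iff, List.filter_eq_nil_iff] at h
    push Not at h
    obtain ⟨a, ha, hp⟩ := h
    simp only [List.all_eq_true, List.contains_iff_mem] at hp
    rw [List.any_eq_true]
    refine ⟨a, ?_, pv_alphabet_isalpha a ha⟩
    rw [pv_mem_foldl_inter, PySem.Set.mem_ofList]
    exact ⟨hp w0 List.mem_cons_self, fun v hv => hp v (List.mem_cons_of_mem w0 hv)⟩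
  · intro h
    rw [List.any_eq_true] at h
    obtain ⟨a, ha, halph⟩ := h
    rw [pv_mem_foldl_inter, PySem.Set.mem_ofList] at ha
    obtain ⟨hw0, hws⟩ := ha
    rw [Ne, List.length_eq_zero_iff, List.filter_eq_nil_iff]
    push Not
    refine ⟨a, halpha a hw0 halph, ?_⟩
    simp only [List.all_eq_true, List.contains_iff_mem]
    intro v hv
    rcases List.mem_cons.mp hv with rfl | hv'
    · exact hw0
    · exact hws v hv'

-- ===== VERDICT (by name: the statement is the Claim_ definition above) =====
theorem constraint_spec : Claim_equal_constraint := by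
  intro txt _ hpre
  show constraint txt = constraint_alt txt
  simp only [constraint, constraint_alt]
  rw [pv_fold_proj, pv_counts_eq, pv_firsts_eq]
  obtain ⟨w0, ws, hw⟩ :=
    List.ne_nil_iff_exists_cons.mp (pv_splitOn_ne_nil (PySem.Chars.lower txt.toList) [' '])
  rw [hw]
  simp only [List.foldl_cons, pv_common_some, Option.getD_some]
  set t := PySem.Chars.lower txt.toList with ht
  set ls := t.filter PySem.Chars.isalpha with hls
  -- pangram guards are literally equal
  have hsz : (PySem.Dict.counter ls).size = (PySem.Set.ofList ls).length := by
    rw [PySem.Dict.size, PySem.Dict.items_counter, List.length_map]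
  by_cases h1 : (PySem.Set.ofList ls).length = 26
  · have h1b : (PySem.Dict.counter ls).size = 26 := by rw [hsz]; exact h1
    rw [if_pos h1, if_pos h1b]
  · have h1b : ¬(PySem.Dict.counter ls).size = 26 := by rw [hsz]; exact h1
    rw [if_neg h1, if_neg h1b]
    by_cases h2 : ls.length = (PySem.Set.ofList ls).length
    · rw [if_pos h2, if_pos ((pv_heterogram_iff ls).mp h2)]
    · have h2b : ¬((PySem.Dict.counter ls).values.all (fun v => v == 1)) = true :=
        fun hb => h2 ((pv_heterogram_iff ls).mpr hb)
      rw [if_neg h2, if_neg h2b]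
      -- now Pre_ forces every word nonempty
      have hne : ∀ w ∈ (w0 :: ws), w ≠ [] := by
        rcases hpre with hp | hp | hp
        · exact absurd hp h1
        · exact absurd ((pv_nodup_iff_len ls).mpr hp) h2
        · rw [← ht, hw] at hp; exact hp
      have htaut := pv_taut_iff (w0 :: ws) hne
      by_cases h3 : (PySem.Set.ofList ((w0 :: ws).map (fun w => PySem.List.pyGetD w 0 ' '))).length = 1
      · rw [if_pos h3, if_pos (htaut.mp h3)]
      · have h3b : ¬PySem.Set.len (PySem.Set.ofList ((w0 :: ws).map (fun w => PySem.List.slice w none (some 1)))) = 1 :=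
          fun hb => h3 (htaut.mpr hb)
        rw [if_neg h3, if_neg h3b]
        have halpha : ∀ c ∈ w0, PySem.Chars.isalpha c = true → c ∈ pvAlphabet := by
          intro c hc hca
          apply pv_mem_lower_alpha (xs := txt.toList) _ hca
          have : c ∈ (PySem.Chars.splitOn t [' ']).flatten := by
            rw [List.mem_flatten]
            exact ⟨w0, by rw [hw]; exact List.mem_cons_self, hc⟩
          rw [pv_splitOn_flatten] at this
          exact List.mem_of_mem_filter this
        have htrans := pv_trans_iff w0 ws halpha
        by_cases h4 : (pvAlphabet.filter (fun ch => ((w0 :: ws).all (fun v => v.contains ch)))).length ≠ 0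
        · rw [if_pos h4, if_pos (htrans.mp h4)]
        · have h4b : ¬((ws.foldl (fun s w => PySem.Set.inter s (PySem.Set.ofList w)) (PySem.Set.ofList w0)).any PySem.Chars.isalpha) = true :=
            fun hb => h4 (htrans.mpr hb)
          rw [if_neg h4, if_neg h4b]
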